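-- pv_equiv track=rewrite | github.com/MrBrantCode/unitest_baseline | mut_generate/mist_train_taco/taco_18580/solution.py | count_ways_to_select_bloggers
-- ===== SOURCE A (Python) =====
-- def count_ways_to_select_bloggers(n, k, a):
--     MOD = 1000000007
--
--     # Sort the followers in descending order
--     a.sort(reverse=True)
--
--     # Select the top k bloggers
--     top_k_followers = a[:k]
--
--     # Find the minimum number of followers in the top k bloggers
--     min_followers_in_top_k = min(top_k_followers)
--
--     # Count how many times this minimum follower count appears in the top k bloggers
--     count_min_in_top_k = top_k_followers.count(min_followers_in_top_k)
--
--     # Count how many times this minimum follower count appears in the entire list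
--     count_min_in_all = a.count(min_followers_in_top_k)
--
--     # Calculate the number of ways to choose count_min_in_top_k from count_min_in_all
--     ways = 1
--     for i in range(count_min_in_top_k):
--         ways = (ways * (count_min_in_all - i)) % MOD
--     for i in range(count_min_in_top_k):
--         ways = (ways // (count_min_in_top_k - i)) % MOD
--
--     return ways
-- ===== SOURCE B (Python) =====
-- def count_ways_to_select_bloggers(n, k, a):
--     MOD = 1000000007
--
--     # take the top k, or all of them if there are fewer than k
--     kk = min(k, len(a))
--
--     # one-pass frequency table instead of sorting the whole list
--     cnt = {}
--     for x in a:
--         cnt[x] = cnt.get(x, 0) + 1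
--
--     # walk distinct values in decreasing order to find the k-th largest
--     # value m and how many copies of it land in the top k
--     remaining = kk
--     m = 0
--     t = 0
--     for v in sorted(cnt, reverse=True):
--         if remaining <= cnt[v]:
--             m = v
--             t = remaining
--             break
--         remaining -= cnt[v]
--
--     total = cnt[m]
--
--     ways = 1
--     for i in range(t):
--         ways = ways * (total - i) % MOD
--     for i in range(t):
--         ways = ways // (t - i) % MOD
--     return ways
-- ===== Notes on version B (the rewrite author's own statement) =====
-- stated objective: alternative
-- what changed: B replaces A's full descending sort + slice + min + two counting passes by a one-pass frequency table and a single scan of the distinct values in decreasing order to locate the k-th largest value and its multiplicities; Pre_ restricts to the natural domain 1 <= k with a nonempty list, excluding k <= 0 (where A either raises ValueError on min([]) or returns a value via Python's negative-slice wraparound, outside the problem's domain); A also sorts its list argument in place, B does not mutate it.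
-- outside the precondition, e.g. on count_ways_to_select_bloggers(3, -2, [5, 5, 3]): A returns 2, B returns 1; on count_ways_to_select_bloggers(1, 0, [5]): A raises ValueError, B returns 1
import Mathlib
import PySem

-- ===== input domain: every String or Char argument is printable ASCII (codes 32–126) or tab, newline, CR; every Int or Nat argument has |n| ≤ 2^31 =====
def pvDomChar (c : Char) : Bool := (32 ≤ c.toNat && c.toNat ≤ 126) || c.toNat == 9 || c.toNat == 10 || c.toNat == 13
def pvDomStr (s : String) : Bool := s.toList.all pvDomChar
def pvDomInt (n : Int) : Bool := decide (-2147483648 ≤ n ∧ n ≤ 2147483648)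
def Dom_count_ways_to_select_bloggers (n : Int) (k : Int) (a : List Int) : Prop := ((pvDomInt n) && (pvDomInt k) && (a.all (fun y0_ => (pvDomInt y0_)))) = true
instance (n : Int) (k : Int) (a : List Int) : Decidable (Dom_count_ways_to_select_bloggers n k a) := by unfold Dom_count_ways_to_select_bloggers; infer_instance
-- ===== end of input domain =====

-- B replaces A's full descending sort + slice + min + two count passes by a one-pass frequency
-- table and a scan of the distinct values in decreasing order (alternative algorithm, not
-- measured faster); A sorts its list argument in place, B does not mutate it — the equivalence
-- proved here is about the return value only.

-- ===== PORT A =====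
def count_ways_to_select_bloggers (n : Int) (k : Int) (a : List Int) : Int :=
  let MOD : Int := 1000000007
  let s := PySem.List.sorted a (fun x => x) true
  let topk := PySem.List.slice s none (some k)
  match PySem.List.min? topk (fun x => x) with
  | none => 0  -- Python raises ValueError (min of empty slice) here; excluded by Pre_
  | some m =>
    let cTop : Int := (PySem.List.count topk m : Int)
    let cAll : Int := (PySem.List.count s m : Int)
    let w1 := (PySem.List.pyRange 0 cTop 1).foldl
      (fun w i => PySem.Int.mod (w * (cAll - i)) MOD) 1
    (PySem.List.pyRange 0 cTop 1).foldl
      (fun w i => PySem.Int.mod (PySem.Int.floordiv w (cTop - i)) MOD) w1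

-- ===== PORT B =====
-- the for-loop over the descending distinct values with its break, as structural recursion
def pvSelect (cnt : PySem.Dict Int Int) : List Int → Int → Int × Int
  | [], _r => (0, 0)
  | v :: vs, r => if r ≤ cnt.getD v 0 then (v, r) else pvSelect cnt vs (r - cnt.getD v 0)

def count_ways_to_select_bloggers_alt (n : Int) (k : Int) (a : List Int) : Int :=
  let MOD : Int := 1000000007
  let kk : Int := min k (a.length : Int)
  let cnt := PySem.Dict.counter a
  let vals := PySem.List.sorted cnt.keys (fun x => x) true
  let mt := pvSelect cnt vals kk
  let t := mt.2
  let total := cnt.getD mt.1 0  -- Python cnt[m]; m is a key whenever a is nonempty (Pre_)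
  let w1 := (PySem.List.pyRange 0 t 1).foldl
    (fun w i => PySem.Int.mod (w * (total - i)) MOD) 1
  (PySem.List.pyRange 0 t 1).foldl
    (fun w i => PySem.Int.mod (PySem.Int.floordiv w (t - i)) MOD) w1

-- ===== PRECONDITION & SPEC =====
-- Pre_ restricts to the natural domain: at least one blogger picked (1 ≤ k) from a nonempty
-- list; it excludes k ≤ 0, where A raises ValueError on min([]) (k = 0, or k ≤ -len) or
-- returns a value only via Python's negative-slice wraparound, outside the problem's domain.
def Pre_count_ways_to_select_bloggers (n : Int) (k : Int) (a : List Int) : Prop :=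
  1 ≤ k ∧ a ≠ []
instance (n : Int) (k : Int) (a : List Int) : Decidable (Pre_count_ways_to_select_bloggers n k a) := by
  unfold Pre_count_ways_to_select_bloggers; infer_instance

def pvWitness_count_ways_to_select_bloggers : Int × Int × List Int := (3, 2, [5, 3, 5])

def Spec_count_ways_to_select_bloggers (n : Int) (k : Int) (a : List Int) (out : Int) : Prop := out = count_ways_to_select_bloggers_alt n k a
instance (n : Int) (k : Int) (a : List Int) (out : Int) : Decidable (Spec_count_ways_to_select_bloggers n k a out) := by unfold Spec_count_ways_to_select_bloggers; infer_instance

-- ===== CLAIM (what is proved, stated in full; the proofs are below) =====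
def Claim_equal_count_ways_to_select_bloggers : Prop := ∀ (n : Int) (k : Int) (a : List Int), Dom_count_ways_to_select_bloggers n k a → Pre_count_ways_to_select_bloggers n k a → Spec_count_ways_to_select_bloggers n k a (count_ways_to_select_bloggers n k a)

-- ===== LEMMAS AND PROOFS =====

-- the scan skips a block of values whose counts are nonnegative and sum below the remainder
theorem pvSelect_skip (cnt : PySem.Dict Int Int) (us rest : List Int) (r : Int)
    (h0 : ∀ u ∈ us, 0 ≤ cnt.getD u 0)
    (h1 : (us.map (fun u => cnt.getD u 0)).sum < r) :
    pvSelect cnt (us ++ rest) r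
      = pvSelect cnt rest (r - (us.map (fun u => cnt.getD u 0)).sum) := by
  induction us generalizing r with
  | nil => simp
  | cons u us ih =>
    have hu : 0 ≤ cnt.getD u 0 := h0 u (by simp)
    have hsum : ∀ v ∈ us, 0 ≤ cnt.getD v 0 := fun v hv => h0 v (by simp [hv])
    have hnn : 0 ≤ (us.map (fun u => cnt.getD u 0)).sum := by
      refine List.sum_nonneg ?_
      intro x hx
      obtain ⟨v, hv, rfl⟩ := List.mem_map.mp hx
      exact hsum v hv
    simp only [List.cons_append, List.map_cons, List.sum_cons] at h1 ⊢
    simp only [pvSelect]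
    rw [if_neg (by omega : ¬ r ≤ cnt.getD u 0)]
    rw [ih (r - cnt.getD u 0) hsum (by omega)]
    congr 1
    ring

-- countP of a disjunction of disjoint predicates adds up
theorem pvCountP_or {α : Type} (l : List α) (p q : α → Bool)
    (h : ∀ x, p x = true → q x = false) :
    l.countP (fun x => p x || q x) = l.countP p + l.countP q := by
  induction l with
  | nil => simp
  | cons x l ih =>
    by_cases hp : p x = true
    · simp [hp, h x hp, ih]
      try omega
    · simp only [Bool.not_eq_true] at hp
      by_cases hq : q x = true
      · simp [hp, hq, ih]
        try omega
      · simp only [Bool.not_eq_true] at hq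
        simp [hp, hq, ih]

-- the counts of a set of distinct values sum to the countP of membership
theorem pvSum_counts (a : List Int) (us : List Int) (hnd : us.Nodup) :
    (us.map (fun u => List.count u a)).sum = a.countP (fun x => decide (x ∈ us)) := by
  induction us with
  | nil => simp
  | cons u us ih =>
    have hnd' : us.Nodup := (List.nodup_cons.mp hnd).2
    have hu : u ∉ us := (List.nodup_cons.mp hnd).1
    have hcong : a.countP (fun x => decide (x ∈ u :: us))
        = a.countP (fun x => (x == u) || decide (x ∈ us)) := by
      refine List.countP_congr ?_
      intro x _
      simp [List.mem_cons]
    rw [List.map_cons, List.sum_cons, hcong,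
        pvCountP_or a (fun x => x == u) (fun x => decide (x ∈ us))
          (by intro x hx
              have hxu : x = u := by simpa using hx
              subst hxu
              exact decide_eq_false hu),
        ih hnd']
    have hcu : List.count u a = a.countP (fun x => x == u) := rfl
    omega

-- ===== VERDICT (by name: the statement is the Claim_ definition above) =====
theorem count_ways_to_select_bloggers_spec : Claim_equal_count_ways_to_select_bloggers := by
  intro n k a _hdom hpre
  unfold Spec_count_ways_to_select_bloggers
  obtain ⟨hk1, hane⟩ := hpre
  set s := PySem.List.sorted a (fun x => x) true with hs
  set topk := PySem.List.slice s none (some k) with htopk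
  set cnt := PySem.Dict.counter a with hcnt
  set vals := PySem.List.sorted cnt.keys (fun x => x) true with hvals
  set kk : Int := min k (a.length : Int) with hkkdef
  have hperm : s.Perm a := PySem.List.sorted_perm a (fun x => x) true
  have hlen : s.length = a.length := hperm.length_eq
  have ha0 : 0 < a.length := by
    match a, hane with
    | x :: t, _ => simp
  -- topk is a prefix of s, of length kk
  have hkkT : ∃ T : Nat, topk = s.take T ∧ kk = (T : Int) ∧ 1 ≤ T ∧ T ≤ s.length := by
    refine ⟨min k.toNat s.length, ?_, ?_, ?_, by omega⟩
    · rw [htopk, PySem.List.slice_to s (by omega : (0:Int) ≤ k), List.take_eq_take_iff]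
      omega
    · rw [hkkdef]
      omega
    · omega
  obtain ⟨T, hT, hkk, hT1, hTle⟩ := hkkT
  have hTlen : topk.length = T := by
    rw [hT, List.length_take]
    omega
  have hne : topk ≠ [] := by
    intro h
    rw [h] at hTlen
    simp at hTlen
    omega
  -- A's min exists
  rcases hmin : PySem.List.min? topk (fun x => x) with _ | m
  · exact absurd ((PySem.List.min?_eq_none_iff topk _).mp hmin) hne
  have hmmem : m ∈ topk := PySem.List.min?_mem hmin
  have hmle : ∀ y ∈ topk, m ≤ y := PySem.List.min?_isMin hmin
  have hsplit : s = topk ++ s.drop T := by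
    rw [hT]
    exact (List.take_append_drop T s).symm
  have hpairs : s.Pairwise (fun x y => y ≤ x) := PySem.List.sorted_pairwise_rev a (fun x => x)
  have hcross : ∀ y ∈ s.drop T, y ≤ m := by
    rw [hsplit] at hpairs
    rcases List.pairwise_append.mp hpairs with ⟨_, _, hc⟩
    exact fun y hy => hc m hmmem y hy
  -- Nat bookkeeping
  set g : Nat := s.countP (fun x => decide (m < x)) with hg
  set c1 : Nat := List.count m topk with hc1
  set c2 : Nat := List.count m s with hc2
  have hdrop0 : (s.drop T).countP (fun x => decide (m < x)) = 0 := by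
    rw [List.countP_eq_zero]
    intro y hy
    simpa using not_lt.mpr (hcross y hy)
  have hgtop : g = topk.countP (fun x => decide (m < x)) := by
    have hh : s.countP (fun x => decide (m < x))
        = topk.countP (fun x => decide (m < x)) + (s.drop T).countP (fun x => decide (m < x)) := by
      nth_rewrite 1 [hsplit]
      simp [List.countP_append]
    omega
  have hcnt2 : topk.countP (fun a => decide ¬decide (m < a) = true) = List.count m topk := by
    have hback : List.count m topk = topk.countP (fun x => x == m) := rfl
    rw [hback]
    refine List.countP_congr ?_
    intro x hx
    have h1 : m ≤ x := hmle x hx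
    constructor
    · intro h
      have h2 : ¬ (m < x) := by simpa using h
      have hxm : x = m := by omega
      simp [hxm]
    · intro h
      have hxm : x = m := by simpa using h
      simp [hxm]
  have hc1g : c1 + g = T := by
    have hlen2 := List.length_eq_countP_add_countP (fun x => decide (m < x)) (l := topk)
    omega
  have hc1pos : 1 ≤ c1 := List.count_pos_iff.mpr hmmem
  have hc12 : c1 ≤ c2 := by
    have hh : List.count m s = List.count m topk + List.count m (s.drop T) := by
      nth_rewrite 1 [hsplit]
      simp [List.count_append]
    omega
  -- B's descending distinct-value list
  have hvals' : vals = PySem.List.sorted (PySem.Set.ofList a) (fun x => x) true := by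
    rw [hvals, hcnt, PySem.Dict.keys_counter]
  have hvmem : ∀ x : Int, x ∈ vals ↔ x ∈ a := by
    intro x
    rw [hvals', PySem.List.mem_sorted, PySem.Set.mem_ofList]
  have hvnd : vals.Nodup := by
    rw [hvals']
    exact ((PySem.List.sorted_perm _ _ _).nodup_iff).mpr (PySem.Set.nodup_ofList a)
  have hvpair : vals.Pairwise (fun x y => y < x) := by
    have h1 : vals.Pairwise (fun x y => y ≤ x) := by
      rw [hvals']
      exact PySem.List.sorted_pairwise_rev _ _
    have h2 : vals.Pairwise (fun x y : Int => x ≠ y) := hvnd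
    exact (h1.and h2).imp (fun h => lt_of_le_of_ne h.1 (Ne.symm h.2))
  have hms : m ∈ s := by
    rw [hsplit]
    exact List.mem_append_left _ hmmem
  have hma : m ∈ a := hperm.mem_iff.mp hms
  obtain ⟨us, ws, hdecomp⟩ := List.append_of_mem ((hvmem m).mpr hma)
  have husgt : ∀ u ∈ us, m < u := by
    rw [hdecomp] at hvpair
    rcases List.pairwise_append.mp hvpair with ⟨_, _, hc⟩
    exact fun u hu => hc u hu m (by simp)
  have hwslt : ∀ w ∈ ws, w < m := by
    rw [hdecomp] at hvpair
    rcases List.pairwise_append.mp hvpair with ⟨_, hws, _⟩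
    exact fun w hw => (List.pairwise_cons.mp hws).1 w hw
  have husnd : us.Nodup := by
    rw [hdecomp] at hvnd
    exact hvnd.of_append_left
  have husiff : ∀ x ∈ a, (m < x ↔ x ∈ us) := by
    intro x hx
    constructor
    · intro hlt
      have hxv : x ∈ vals := (hvmem x).mpr hx
      rw [hdecomp] at hxv
      rcases List.mem_append.mp hxv with h | h
      · exact h
      · rcases List.mem_cons.mp h with h | h
        · omega
        · have := hwslt x h
          omega
    · intro hu
      exact husgt x hu
  have hgetD : ∀ u : Int, cnt.getD u 0 = (List.count u a : Int) := by
    intro u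
    rw [hcnt]
    exact PySem.Dict.getD_counter a u
  have hS : (us.map (fun u => cnt.getD u 0)).sum = (g : Int) := by
    have hmapeq : us.map (fun u => cnt.getD u 0) = us.map (fun u => (List.count u a : Int)) :=
      List.map_congr_left (fun u _ => hgetD u)
    have hcast : (us.map (fun u => (List.count u a : Int))).sum
        = ((us.map (fun u => List.count u a)).sum : Int) := by
      rw [Nat.cast_list_sum, List.map_map]
      rfl
    rw [hmapeq, hcast, pvSum_counts a us husnd]
    have hmemP : a.countP (fun x => decide (x ∈ us)) = a.countP (fun x => decide (m < x)) := by
      refine List.countP_congr ?_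
      intro x hx
      simpa using (husiff x hx).symm
    rw [hmemP, hg]
    have := hperm.countP_eq (fun x => decide (m < x))
    omega
  have hnn : ∀ u ∈ us, 0 ≤ cnt.getD u 0 := by
    intro u _
    rw [hgetD u]
    exact Nat.cast_nonneg _
  have hcountmsa : List.count m s = List.count m a := hperm.count_eq m
  have hcond : kk - (g : Int) ≤ cnt.getD m 0 := by
    rw [hgetD m, hkk]
    omega
  have hscan : pvSelect cnt vals kk = (m, (c1 : Int)) := by
    rw [hdecomp, pvSelect_skip cnt us (m :: ws) kk hnn (by rw [hS, hkk]; omega), hS]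
    simp only [pvSelect]
    rw [if_pos hcond]
    have heq : kk - (g : Int) = (c1 : Int) := by
      rw [hkk]
      omega
    rw [heq]
  have htt : cnt.getD m 0 = (c2 : Int) := by
    rw [hgetD m]
    omega
  have hctop : PySem.List.count topk m = c1 := by
    rw [PySem.List.count_eq]
  have hcall : PySem.List.count s m = c2 := by
    rw [PySem.List.count_eq]
  -- assemble: unfold both ports and rewrite both sides to the same fold
  simp only [count_ways_to_select_bloggers, count_ways_to_select_bloggers_alt,
    ← hs, ← htopk, ← hcnt, ← hvals, ← hkkdef]
  simp only [hmin]
  simp only [hscan, htt, hctop, hcall]
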